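-- pv_equiv track=rewrite | github.com/pritomrajkhowa/webapp_loop_bound | FOLTranslation.py | is_program_var
-- ===== SOURCE A (Python) =====
-- def is_program_var(x,v):
--     if x.startswith('_N'):
--         return True
--     for y in v:
--         if x==y or x.startswith(y+OUT) or (x.startswith(y+TEMP) and
--                                            x[len(y+TEMP):].isdigit()) or x.startswith(y+LABEL):
--             return True
--     return False
--
-- OUT='1' #so don't name variables x1, y1...
--
-- TEMP = '' #so if x is a variable, then don't name variables x2,x3,... (temp starts at 2)
--
-- LABEL = '_' #so if x is a variable, then don't name variables x_1,x_2,
-- ===== SOURCE B (Python) =====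
-- OUT = '1'
-- TEMP = ''
-- LABEL = '_'
--
-- def is_program_var(x, v):
--     if x.startswith('_N'):
--         return True
--     vs = set(v)
--     for i in range(len(x) + 1):
--         if x[:i] in vs:
--             s = x[i:]
--             if (s == '' or s.startswith(OUT)
--                     or (s.startswith(TEMP) and s[len(TEMP):].isdigit())
--                     or s.startswith(LABEL)):
--                 return True
--     return False
-- ===== Notes on version B (the rewrite author's own statement) =====
-- stated objective: alternative
-- what changed: Instead of scanning v and testing four startswith patterns of x per element, B enumerates the prefixes of x, looks each prefix up in a set built from v once, and tests the residual suffix against the one combined condition.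
import Mathlib
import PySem

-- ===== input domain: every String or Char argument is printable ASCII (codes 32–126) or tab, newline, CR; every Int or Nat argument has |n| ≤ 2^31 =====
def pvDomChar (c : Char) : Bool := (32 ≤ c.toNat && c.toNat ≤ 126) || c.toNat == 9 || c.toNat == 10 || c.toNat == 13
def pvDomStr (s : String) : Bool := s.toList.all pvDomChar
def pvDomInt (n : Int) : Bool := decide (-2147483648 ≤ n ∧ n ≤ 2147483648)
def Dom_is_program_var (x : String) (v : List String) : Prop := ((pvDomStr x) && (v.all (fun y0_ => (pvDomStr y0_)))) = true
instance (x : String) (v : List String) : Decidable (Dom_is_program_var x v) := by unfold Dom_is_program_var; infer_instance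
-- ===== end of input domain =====

-- B replaces A's scan of v (testing four prefix patterns of x per element) by a single
-- loop over the prefixes of x against a membership set built from v; objective: alternative.
-- Module constants from the Python source.
def pvOUT : String := "1"
def pvTEMP : String := ""
def pvLABEL : String := "_"

-- ===== PORT A =====
-- A's 'for y in v' loop, returning True on the first hit.
def isProgVarLoopA (x : String) : List String → Bool
  | [] => false
  | y :: rest =>
    if x == y || PySem.Str.startswith x (y ++ pvOUT)
        || (PySem.Str.startswith x (y ++ pvTEMP)
            && PySem.Str.strIsdigit (PySem.Str.slice x (some ((PySem.Str.len (y ++ pvTEMP) : Int))) none))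
        || PySem.Str.startswith x (y ++ pvLABEL)
    then true
    else isProgVarLoopA x rest

def is_program_var (x : String) (v : List String) : Bool :=
  if PySem.Str.startswith x "_N" then true
  else isProgVarLoopA x v

-- ===== PORT B =====
-- B's 'for i in range(len(x)+1)' loop: prefix x[:i] looked up in the set vs; suffix tested.
def isProgVarLoopB (x : String) (vs : PySem.Set String) : List Int → Bool
  | [] => false
  | i :: rest =>
    if PySem.Set.contains vs (PySem.Str.slice x none (some i)) then
      let s := PySem.Str.slice x (some i) none
      if s == "" || PySem.Str.startswith s pvOUT
          || (PySem.Str.startswith s pvTEMP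
              && PySem.Str.strIsdigit (PySem.Str.slice s (some ((PySem.Str.len pvTEMP : Int))) none))
          || PySem.Str.startswith s pvLABEL
      then true
      else isProgVarLoopB x vs rest
    else isProgVarLoopB x vs rest

def is_program_var_alt (x : String) (v : List String) : Bool :=
  if PySem.Str.startswith x "_N" then true
  else
    let vs := PySem.Set.ofList v
    isProgVarLoopB x vs (PySem.List.pyRange 0 ((PySem.Str.len x : Int) + 1) 1)

-- ===== PRECONDITION & SPEC =====
def Spec_is_program_var (x : String) (v : List String) (out : Bool) : Prop := out = is_program_var_alt x v
instance (x : String) (v : List String) (out : Bool) : Decidable (Spec_is_program_var x v out) := by unfold Spec_is_program_var; infer_instance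

-- ===== CLAIM (what is proved, stated in full; the proofs are below) =====
def Claim_equal_is_program_var : Prop := ∀ (x : String) (v : List String), Dom_is_program_var x v → Spec_is_program_var x v (is_program_var x v)

-- ===== LEMMAS AND PROOFS =====

-- The common suffix condition, over List Char.
def pvSufCond (s : List Char) : Bool :=
  decide (s = []) || PySem.Chars.startswith s ['1'] || PySem.Chars.strIsdigit s || PySem.Chars.startswith s ['_']

-- The common characterisation: some y ∈ v is a prefix of x whose residual suffix matches.
def pvHit (x : String) (v : List String) : Prop :=
  ∃ y ∈ v, y.toList <+: x.toList ∧ pvSufCond (x.toList.drop y.toList.length) = true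

theorem pvBeq_iff (x y : String) :
    (x == y) = true ↔ y.toList <+: x.toList ∧ x.toList.drop y.toList.length = [] := by
  rw [beq_iff_eq, ← String.toList_inj]
  constructor
  · intro h
    rw [h]
    exact ⟨List.prefix_refl _, by simp⟩
  · rintro ⟨h1, h2⟩
    rw [List.prefix_iff_eq_take] at h1
    conv_lhs => rw [← List.take_append_drop y.toList.length x.toList]
    rw [h2, ← h1, List.append_nil]
theorem pvPrefixAppend (ys t xs : List Char) :
    ys ++ t <+: xs ↔ ys <+: xs ∧ t <+: xs.drop ys.length := by
  constructor
  · intro h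
    refine ⟨(List.prefix_append ys t).trans h, ?_⟩
    obtain ⟨k, hk⟩ := h
    have hx : xs = ys ++ (t ++ k) := by rw [← hk, List.append_assoc]
    rw [hx, List.drop_left]
    exact ⟨k, rfl⟩
  · rintro ⟨h1, h2⟩
    have hx : xs = ys ++ xs.drop ys.length := by
      conv_lhs => rw [← List.take_append_drop ys.length xs]
      rw [List.prefix_iff_eq_take] at h1
      rw [← h1]
    rw [hx]
    exact (List.prefix_append_right_inj ys).mpr h2
theorem pvCondA_iff (x y : String) :
    (x == y || PySem.Str.startswith x (y ++ pvOUT)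
        || (PySem.Str.startswith x (y ++ pvTEMP)
            && PySem.Str.strIsdigit (PySem.Str.slice x (some ((PySem.Str.len (y ++ pvTEMP) : Int))) none))
        || PySem.Str.startswith x (y ++ pvLABEL)) = true
      ↔ y.toList <+: x.toList ∧ pvSufCond (x.toList.drop y.toList.length) = true := by
  have hT : y ++ pvTEMP = y := by simp [pvTEMP]
  have hslice : (PySem.Str.slice x (some ((y.toList.length : Nat) : Int)) none).toList
      = x.toList.drop y.toList.length := by
    simp [PySem.List.slice_from_natCast]
  have hdig : PySem.Str.strIsdigit (PySem.Str.slice x (some ((PySem.Str.len y : Int)) ) none)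
      = PySem.Chars.strIsdigit (x.toList.drop y.toList.length) := by
    rw [PySem.Str.strIsdigit_eq]
    rw [show (PySem.Str.len y : Int) = ((y.toList.length : Nat) : Int) by simp]
    rw [hslice]
  simp only [hT, Bool.or_eq_true, Bool.and_eq_true, pvBeq_iff, hdig,
    PySem.Str.startswith_eq, PySem.Chars.startswith_iff, String.toList_append,
    pvOUT, pvLABEL, pvSufCond, pvPrefixAppend, decide_eq_true_iff]
  have h1 : "1".toList = ['1'] := by decide
  have h2 : "_".toList = ['_'] := by decide
  rw [h1, h2]
  constructor
  · rintro (((⟨hp, hc⟩ | ⟨hp, hc⟩) | ⟨hp, hc⟩) | ⟨hp, hc⟩)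
    · exact ⟨hp, Or.inl (Or.inl (Or.inl hc))⟩
    · exact ⟨hp, Or.inl (Or.inl (Or.inr hc))⟩
    · exact ⟨hp, Or.inl (Or.inr hc)⟩
    · exact ⟨hp, Or.inr hc⟩
  · rintro ⟨hp, ((hc | hc) | hc) | hc⟩
    · exact Or.inl (Or.inl (Or.inl ⟨hp, hc⟩))
    · exact Or.inl (Or.inl (Or.inr ⟨hp, hc⟩))
    · exact Or.inl (Or.inr ⟨hp, hc⟩)
    · exact Or.inr ⟨hp, hc⟩

def pvBCond (x : String) (i : Int) : Bool :=
  let s := PySem.Str.slice x (some i) none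
  s == "" || PySem.Str.startswith s pvOUT
    || (PySem.Str.startswith s pvTEMP
        && PySem.Str.strIsdigit (PySem.Str.slice s (some ((PySem.Str.len pvTEMP : Int))) none))
    || PySem.Str.startswith s pvLABEL

theorem pvLoopB_any (x : String) (vs : PySem.Set String) (is : List Int) :
    isProgVarLoopB x vs is = true
      ↔ ∃ i ∈ is, PySem.Set.contains vs (PySem.Str.slice x none (some i)) = true ∧ pvBCond x i = true := by
  induction is with
  | nil => simp [isProgVarLoopB]
  | cons i rest ih =>
    rw [isProgVarLoopB]
    by_cases h1 : PySem.Set.contains vs (PySem.Str.slice x none (some i)) = true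
    · rw [if_pos h1]
      change (if pvBCond x i = true then true else isProgVarLoopB x vs rest) = true ↔ _
      by_cases h2 : pvBCond x i = true
      · rw [if_pos h2]
        simp only [true_iff]
        exact ⟨i, List.mem_cons_self, h1, h2⟩
      · rw [if_neg h2, ih]
        constructor
        · rintro ⟨j, hj, hc⟩
          exact ⟨j, List.mem_cons_of_mem _ hj, hc⟩
        · rintro ⟨j, hj, hc, hd⟩
          rcases List.mem_cons.mp hj with rfl | hj'
          · exact absurd hd h2
          · exact ⟨j, hj', hc, hd⟩
    · rw [if_neg h1, ih]
      constructor
      · rintro ⟨j, hj, hc⟩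
        exact ⟨j, List.mem_cons_of_mem _ hj, hc⟩
      · rintro ⟨j, hj, hc, hd⟩
        rcases List.mem_cons.mp hj with rfl | hj'
        · exact absurd hc h1
        · exact ⟨j, hj', hc, hd⟩

theorem pvBCond_eq (x : String) (i : Int) (h : 0 ≤ i) :
    pvBCond x i = pvSufCond (x.toList.drop i.toNat) := by
  have hs : (PySem.Str.slice x (some i) none).toList = x.toList.drop i.toNat :=
    by simp [PySem.List.slice_from _ h]
  have h0 : (PySem.Str.len pvTEMP : Int) = ((0 : Nat) : Int) := by decide
  have hinner : (PySem.Str.slice (PySem.Str.slice x (some i) none) (some ((PySem.Str.len pvTEMP : Int))) none).toList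
      = x.toList.drop i.toNat := by
    rw [h0]
    simp [hs]
  have e1 : pvOUT.toList = ['1'] := by decide
  have e2 : pvTEMP.toList = [] := by decide
  have e3 : pvLABEL.toList = ['_'] := by decide
  have e4 : ("" : String).toList = [] := by decide
  rw [Bool.eq_iff_iff]
  unfold pvBCond pvSufCond
  simp only [Bool.or_eq_true, Bool.and_eq_true, beq_iff_eq, ← String.toList_inj, hs,
    PySem.Str.startswith_eq, PySem.Chars.startswith_iff, PySem.Str.strIsdigit_eq,
    hinner, e1, e2, e3, e4, List.nil_prefix, true_and, decide_eq_true_iff]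

theorem pvLoopB_iff (x : String) (v : List String) :
    isProgVarLoopB x (PySem.Set.ofList v) (PySem.List.pyRange 0 ((PySem.Str.len x : Int) + 1) 1) = true ↔ pvHit x v := by
  have hlen : (PySem.Str.len x : Int) = (x.toList.length : Int) := by simp
  rw [pvLoopB_any]
  constructor
  · rintro ⟨i, hi, hc, hd⟩
    rw [PySem.List.mem_pyRange_one, hlen] at hi
    obtain ⟨h0, hlt⟩ := hi
    have hle : i.toNat ≤ x.toList.length := by omega
    have hy : (PySem.Str.slice x none (some i)).toList = x.toList.take i.toNat := by
      simp [PySem.List.slice_to _ h0]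
    have hmem : (PySem.Str.slice x none (some i)) ∈ v := by
      simpa [pysem] using hc
    refine ⟨_, hmem, ?_, ?_⟩
    · rw [hy]; exact List.take_prefix _ _
    · rw [pvBCond_eq x i h0] at hd
      rw [hy, List.length_take_of_le hle]
      exact hd
  · rintro ⟨y, hy, hp, hc⟩
    have hle := hp.length_le
    refine ⟨(y.toList.length : Int), ?_, ?_, ?_⟩
    · rw [PySem.List.mem_pyRange_one, hlen]
      constructor <;> omega
    · have hsl : (PySem.Str.slice x none (some (y.toList.length : Int))) = y := by
        rw [← String.toList_inj]
        rw [List.prefix_iff_eq_take] at hp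
        simp only [PySem.Str.toList_slice, PySem.Chars.slice_eq_listSlice,
          PySem.List.slice_to_natCast]
        exact hp.symm
      rw [hsl]
      simpa [pysem] using hy
    · rw [pvBCond_eq _ _ (by omega)]
      simpa using hc


theorem pvLoopA_iff (x : String) (v : List String) :
    isProgVarLoopA x v = true ↔ pvHit x v := by
  induction v with
  | nil => simp [isProgVarLoopA, pvHit]
  | cons y rest ih =>
    rw [isProgVarLoopA]
    split_ifs with h
    · simp only [true_iff]
      obtain ⟨hp, hc⟩ := (pvCondA_iff x y).mp h
      exact ⟨y, List.mem_cons_self, hp, hc⟩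
    · rw [ih]
      unfold pvHit
      simp only [List.mem_cons]
      constructor
      · rintro ⟨z, hz, hp, hc⟩
        exact ⟨z, Or.inr hz, hp, hc⟩
      · rintro ⟨z, hz, hp, hc⟩
        rcases hz with rfl | hz
        · exact absurd ((pvCondA_iff x z).mpr ⟨hp, hc⟩) h
        · exact ⟨z, hz, hp, hc⟩

-- ===== VERDICT (by name: the statement is the Claim_ definition above) =====
theorem is_program_var_spec : Claim_equal_is_program_var := by
  intro x v _
  unfold Spec_is_program_var is_program_var is_program_var_alt
  split_ifs with h
  · rfl
  · rw [Bool.eq_iff_iff]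
    exact (pvLoopA_iff x v).trans (pvLoopB_iff x v).symm
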